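-- pv_equiv track=rewrite | github.com/wright-benjamin-1701/coding-agent | v0/src/core/collaboration.py | _extract_recent_topics
-- ===== SOURCE A (Python) =====
-- from typing import Dict, List, Optional, Any
--
-- def _extract_recent_topics(conversation_history: List[Dict[str, Any]]) -> List[str]:
--     """Extract recent topics from conversation history"""
--
--     topics = []
--
--     # Simple keyword extraction from recent messages
--     recent_messages = conversation_history[-10:] if conversation_history else []
--
--     for message in recent_messages:
--         content = message.get("content", "").lower()
--
--         # Look for key topics
--         if "git" in content:
--             topics.append("Git operations")
--         elif any(word in content for word in ["refactor", "rename", "extract"]):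
--             topics.append("Code refactoring")
--         elif any(word in content for word in ["debug", "error", "bug", "fix"]):
--             topics.append("Debugging")
--         elif any(word in content for word in ["search", "find", "look"]):
--             topics.append("Code search")
--         elif any(word in content for word in ["file", "read", "write", "create"]):
--             topics.append("File operations")
--
--     # Remove duplicates while preserving order
--     unique_topics = []
--     for topic in topics:
--         if topic not in unique_topics:
--             unique_topics.append(topic)
--
--     return unique_topics
-- ===== SOURCE B (Python) =====
-- _TOPIC_TABLE = [
--     ("Git operations", ["git"]),
--     ("Code refactoring", ["refactor", "rename", "extract"]),
--     ("Debugging", ["debug", "error", "bug", "fix"]),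
--     ("Code search", ["search", "find", "look"]),
--     ("File operations", ["file", "read", "write", "create"]),
-- ]
--
--
-- def _extract_recent_topics(conversation_history):
--     """Inverted-loop formulation: locate each topic's first matching message
--     (respecting the priority of earlier table rows), then emit the topics in
--     position order of those first matches."""
--     contents = [m.get("content", "").lower() for m in conversation_history[-10:]]
--     first_at = {}
--     for j, (topic, kws) in enumerate(_TOPIC_TABLE):
--         for pos, c in enumerate(contents):
--             if any(k in c for k in kws) and not any(
--                     k in c
--                     for _, earlier in _TOPIC_TABLE[:j]
--                     for k in earlier):
--                 first_at[pos] = topic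
--                 break
--     return [first_at[p] for p in range(len(contents)) if p in first_at]
-- ===== Notes on version B (the rewrite author's own statement) =====
-- stated objective: alternative
-- what changed: Inverts the loop nesting: instead of classifying each message in turn and deduplicating afterwards, B scans per topic for its first matching message position (respecting earlier-row priority), records them in a position-keyed dict, and emits topics by increasing position.
import Mathlib
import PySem

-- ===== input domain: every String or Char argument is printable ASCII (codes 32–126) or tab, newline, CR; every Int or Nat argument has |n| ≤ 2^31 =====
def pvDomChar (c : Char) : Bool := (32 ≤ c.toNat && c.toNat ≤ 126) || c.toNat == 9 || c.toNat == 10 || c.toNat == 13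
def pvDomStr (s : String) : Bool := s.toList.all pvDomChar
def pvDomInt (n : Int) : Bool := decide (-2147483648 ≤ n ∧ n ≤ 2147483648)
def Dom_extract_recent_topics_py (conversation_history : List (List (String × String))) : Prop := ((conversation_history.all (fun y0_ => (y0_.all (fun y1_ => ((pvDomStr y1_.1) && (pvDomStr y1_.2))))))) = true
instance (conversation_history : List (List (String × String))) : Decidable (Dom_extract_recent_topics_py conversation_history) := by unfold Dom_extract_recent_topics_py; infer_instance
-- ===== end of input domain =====

-- B inverts the loop nesting: it finds each topic's first matching message position (respecting
-- earlier-row priority) and emits topics in position order, instead of classifying message by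
-- message and deduplicating afterwards (alternative formulation, same cost).

-- ===== PORT A =====
-- literal transliteration of A: the if/elif ladder over the last 10 messages, then a dedup loop
def extract_recent_topics_py (conversation_history : List (List (String × String))) : List String :=
  -- recent_messages = conversation_history[-10:] if conversation_history else []
  let recent_messages : List (List (String × String)) :=
    if conversation_history.isEmpty then []
    else PySem.List.slice conversation_history (some (-10)) none
  let topics : List String := recent_messages.foldl (fun topics message =>
    -- content = message.get("content", "").lower()
    let content := PySem.Str.lower ((message.lookup "content").getD "")
    if PySem.Str.isIn "git" content then topics ++ ["Git operations"]
    else if ["refactor", "rename", "extract"].any (fun w => PySem.Str.isIn w content) then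
      topics ++ ["Code refactoring"]
    else if ["debug", "error", "bug", "fix"].any (fun w => PySem.Str.isIn w content) then
      topics ++ ["Debugging"]
    else if ["search", "find", "look"].any (fun w => PySem.Str.isIn w content) then
      topics ++ ["Code search"]
    else if ["file", "read", "write", "create"].any (fun w => PySem.Str.isIn w content) then
      topics ++ ["File operations"]
    else topics) []
  -- remove duplicates while preserving order
  topics.foldl (fun unique_topics topic =>
    if unique_topics.contains topic then unique_topics else unique_topics ++ [topic]) []

-- ===== PORT B =====
def pvTopicTable : List (String × List String) :=
  [("Git operations", ["git"]),
   ("Code refactoring", ["refactor", "rename", "extract"]),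
   ("Debugging", ["debug", "error", "bug", "fix"]),
   ("Code search", ["search", "find", "look"]),
   ("File operations", ["file", "read", "write", "create"])]

-- literal transliteration of B: outer loop over the topic table, inner scan (with break) for the
-- first message position matching that topic but no earlier table row; emit by position order
def extract_recent_topics_py_alt (conversation_history : List (List (String × String))) : List String :=
  let contents : List String := (PySem.List.slice conversation_history (some (-10)) none).map
      (fun m => PySem.Str.lower ((m.lookup "content").getD ""))
  let first_at : PySem.Dict Int String :=
    (PySem.List.enumerate pvTopicTable).foldl (fun d jp =>
      match (PySem.List.enumerate contents).find? (fun pc =>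
          jp.2.2.any (fun k => PySem.Str.isIn k pc.2) &&
          !((PySem.List.slice pvTopicTable none (some jp.1)).any
              (fun q => q.2.any (fun k => PySem.Str.isIn k pc.2)))) with
      | some pc => PySem.Dict.insert d pc.1 jp.2.1
      | none => d) PySem.Dict.empty
  (PySem.List.pyRange 0 (contents.length) 1).filterMap (fun p => PySem.Dict.get? first_at p)

-- ===== PRECONDITION & SPEC =====
def Spec_extract_recent_topics_py (conversation_history : List (List (String × String))) (out : List String) : Prop := out = extract_recent_topics_py_alt conversation_history
instance (conversation_history : List (List (String × String))) (out : List String) : Decidable (Spec_extract_recent_topics_py conversation_history out) := by unfold Spec_extract_recent_topics_py; infer_instance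

-- ===== CLAIM (what is proved, stated in full; the proofs are below) =====
def Claim_equal_extract_recent_topics_py : Prop := ∀ (conversation_history : List (List (String × String))), Dom_extract_recent_topics_py conversation_history → Spec_extract_recent_topics_py conversation_history (extract_recent_topics_py conversation_history)

-- ===== LEMMAS AND PROOFS =====

-- `any(k in c for k in kws)` for a table row
def pvTm (p : String × List String) (c : String) : Bool := p.2.any (fun k => PySem.Str.isIn k c)

-- "message content c is classified to table row j": row j matches and no earlier row does
def pvM (j : Int) (c : String) : Bool :=
  decide (0 ≤ j) && pvTm (pvTopicTable.getD j.toNat ("", [])) c &&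
    !((pvTopicTable.take j.toNat).any (fun q => pvTm q c))

def pvT (j : Int) : String := (pvTopicTable.getD j.toNat ("", [])).1

-- position (if any) of the first message in cs classified to row j
def pvFirst (j : Int) (cs : List String) : Option Int :=
  ((PySem.List.enumerate cs).find? (fun pc => pvM j pc.2)).map Prod.fst

-- the common canonical function: emit row j's topic at the first position classified to j,
-- in position order, rows P still unemitted
def pvG (P : List Int) : List String → List String
  | [] => []
  | c :: cs =>
    match P.find? (fun j => pvM j c) with
    | some j => pvT j :: pvG (P.filter (fun i => i != j)) cs
    | none => pvG P cs

-- the topic A's ladder assigns to a content, as an Option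
def pvClassify (content : String) : Option String :=
  if PySem.Str.isIn "git" content then some "Git operations"
  else if ["refactor", "rename", "extract"].any (fun w => PySem.Str.isIn w content) then
    some "Code refactoring"
  else if ["debug", "error", "bug", "fix"].any (fun w => PySem.Str.isIn w content) then
    some "Debugging"
  else if ["search", "find", "look"].any (fun w => PySem.Str.isIn w content) then
    some "Code search"
  else if ["file", "read", "write", "create"].any (fun w => PySem.Str.isIn w content) then
    some "File operations"
  else none

set_option maxRecDepth 40000 in
theorem pvM_excl (c : String) (j j' : Int) (h : pvM j c = true) (h' : pvM j' c = true) : j = j' := by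
  unfold pvM at h h'
  simp only [Bool.and_eq_true, decide_eq_true_eq] at h h'
  obtain ⟨⟨hj0, hjq⟩, hjn⟩ := h
  obtain ⟨⟨hj0', hjq'⟩, hjn'⟩ := h'
  have hlt : j.toNat < 5 := by
    by_contra hge
    have : pvTopicTable.getD j.toNat ("", []) = ("", []) := by
      apply List.getD_eq_default
      simp [pvTopicTable]; omega
    rw [this] at hjq
    simp [pvTm] at hjq
  have hlt' : j'.toNat < 5 := by
    by_contra hge
    have : pvTopicTable.getD j'.toNat ("", []) = ("", []) := by
      apply List.getD_eq_default
      simp [pvTopicTable]; omega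
    rw [this] at hjq'
    simp [pvTm] at hjq'
  have hj : j = (j.toNat : Int) := (Int.toNat_of_nonneg hj0).symm
  have hj' : j' = (j'.toNat : Int) := (Int.toNat_of_nonneg hj0').symm
  rw [hj, hj']
  set a := j.toNat with ha
  set b := j'.toNat with hb
  clear_value a b
  clear hj hj' ha hb hj0 hj0'
  interval_cases a <;> interval_cases b <;> simp_all [pvTm, pvTopicTable]
set_option maxRecDepth 40000 in
theorem pvClassify_eq_find (c : String) :
    pvClassify c = ((([0, 1, 2, 3, 4]) : List Int).find? (fun j => pvM j c)).map pvT := by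
  have e0 : PySem.Str.isIn "git" c = pvTm ("Git operations", ["git"]) c := by simp [pvTm]
  have e1 : (["refactor", "rename", "extract"].any (fun w => PySem.Str.isIn w c))
      = pvTm ("Code refactoring", ["refactor", "rename", "extract"]) c := by simp [pvTm]
  have e2 : (["debug", "error", "bug", "fix"].any (fun w => PySem.Str.isIn w c))
      = pvTm ("Debugging", ["debug", "error", "bug", "fix"]) c := by simp [pvTm]
  have e3 : (["search", "find", "look"].any (fun w => PySem.Str.isIn w c))
      = pvTm ("Code search", ["search", "find", "look"]) c := by simp [pvTm]
  have e4 : (["file", "read", "write", "create"].any (fun w => PySem.Str.isIn w c))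
      = pvTm ("File operations", ["file", "read", "write", "create"]) c := by simp [pvTm]
  rw [pvClassify, e0, e1, e2, e3, e4]
  cases h0 : pvTm ("Git operations", ["git"]) c <;>
  cases h1 : pvTm ("Code refactoring", ["refactor", "rename", "extract"]) c <;>
  cases h2 : pvTm ("Debugging", ["debug", "error", "bug", "fix"]) c <;>
  cases h3 : pvTm ("Code search", ["search", "find", "look"]) c <;>
  cases h4 : pvTm ("File operations", ["file", "read", "write", "create"]) c <;>
  simp [pvM, pvT, pvTopicTable, List.find?, h0, h1, h2, h3, h4]
theorem pvFirst_nonneg (j : Int) (cs : List String) (p : Int) (h : pvFirst j cs = some p) : 0 ≤ p := by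
  unfold pvFirst at h
  cases hf : (PySem.List.enumerate cs).find? (fun pc => pvM j pc.2) with
  | none => rw [hf] at h; simp at h
  | some pc =>
    rw [hf] at h
    simp at h
    have hm := List.mem_of_find?_eq_some hf
    rw [PySem.List.mem_enumerate_iff] at hm
    obtain ⟨k, hk, rfl⟩ := hm
    simp at h
    omega

theorem pvFirst_inj (cs : List String) (j j' : Int) (p : Int)
    (h : pvFirst j cs = some p) (h' : pvFirst j' cs = some p) : j = j' := by
  unfold pvFirst at h h'
  cases hf : (PySem.List.enumerate cs).find? (fun pc => pvM j pc.2) with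
  | none => rw [hf] at h; simp at h
  | some pc =>
    cases hf' : (PySem.List.enumerate cs).find? (fun pc => pvM j' pc.2) with
    | none => rw [hf'] at h'; simp at h'
    | some pc' =>
      rw [hf] at h; rw [hf'] at h'
      simp at h h'
      have hp := List.find?_some hf
      have hp' := List.find?_some hf'
      have hm := List.mem_of_find?_eq_some hf
      have hm' := List.mem_of_find?_eq_some hf'
      rw [PySem.List.mem_enumerate_iff] at hm hm'
      obtain ⟨k, hk, rfl⟩ := hm
      obtain ⟨k', hk', rfl⟩ := hm'
      simp at h h' hp hp'
      have hkk : k = k' := by omega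
      subst hkk
      exact pvM_excl _ _ _ hp hp'
theorem pvGetBuild (P : List Int) (cs : List String) (p : Int) (d : PySem.Dict Int String) :
    PySem.Dict.get? (P.foldl (fun d j =>
        match (PySem.List.enumerate cs).find? (fun pc => pvM j pc.2) with
        | some pc => PySem.Dict.insert d pc.1 (pvT j)
        | none => d) d) p
      = (match P.find? (fun j => pvFirst j cs == some p) with
         | some j => some (pvT j)
         | none => PySem.Dict.get? d p) := by
  induction P generalizing d with
  | nil => simp
  | cons j0 P ih =>
    simp only [List.foldl_cons, List.find?_cons]
    cases hf : (PySem.List.enumerate cs).find? (fun pc => pvM j0 pc.2) with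
    | none =>
      have hfst : pvFirst j0 cs = none := by simp [pvFirst, hf]
      simp only [hfst]
      rw [ih]
      norm_num
    | some pc =>
      have hfst : pvFirst j0 cs = some pc.1 := by simp [pvFirst, hf]
      by_cases hp : pc.1 = p
      · subst hp
        have : (pvFirst j0 cs == some pc.1) = true := by simp [hfst]
        simp only [this]
        rw [ih]
        cases hr : P.find? (fun j => pvFirst j cs == some pc.1) with
        | none => simp [PySem.Dict.get?_insert_self]
        | some j1 =>
          have hj1 : pvFirst j1 cs = some pc.1 := by
            have := List.find?_some hr
            simpa using this
          have : j1 = j0 := pvFirst_inj cs j1 j0 pc.1 hj1 hfst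
          subst this
          rfl
      · have : (pvFirst j0 cs == some p) = false := by simp [hfst]; omega
        simp only [this]
        rw [ih]
        cases P.find? (fun j => pvFirst j cs == some p) with
        | none => simp [PySem.Dict.get?_insert_of_ne _ _ (by omega : p ≠ pc.1)]
        | some j1 => rfl
theorem pvEnumShift (cs : List String) : ∀ t : Int,
    PySem.List.enumerate cs (t + 1) = (PySem.List.enumerate cs t).map (fun pc => (pc.1 + 1, pc.2)) := by
  induction cs with
  | nil => intro t; simp [PySem.List.enumerate_nil]
  | cons x cs ih =>
    intro t
    rw [PySem.List.enumerate_cons, PySem.List.enumerate_cons, List.map_cons]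
    rw [ih (t + 1)]

theorem pvFirst_cons (j : Int) (c : String) (cs : List String) :
    pvFirst j (c :: cs) = if pvM j c then some 0 else (pvFirst j cs).map (· + 1) := by
  unfold pvFirst
  rw [show ((0:Int)) = 0 from rfl, PySem.List.enumerate_cons, List.find?_cons]
  by_cases h : pvM j c
  · simp [h]
  · simp only [h]
    rw [show (0:Int) + 1 = 0 + 1 from rfl, pvEnumShift cs 0, List.find?_map]
    simp only [Bool.false_eq_true, if_false]
    cases hf : (PySem.List.enumerate cs 0).find? (fun pc => pvM j pc.2) with
    | none => simp only [Function.comp_def]; rw [hf]; rfl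
    | some pc => simp only [Function.comp_def]; rw [hf]; rfl

theorem pvFindUnique (P : List Int) (p : Int → Bool) (j0 : Int)
    (hmem : j0 ∈ P) (hp : p j0 = true) (huniq : ∀ x, p x = true → x = j0) :
    P.find? p = some j0 := by
  induction P with
  | nil => simp at hmem
  | cons a P ih =>
    rw [List.find?_cons]
    by_cases ha : p a = true
    · cases huniq a ha
      simp [ha]
    · simp only [Bool.not_eq_true] at ha
      simp only [ha]
      rcases List.mem_cons.mp hmem with rfl | hm
      · rw [hp] at ha; simp at ha
      · exact ih hm

theorem pvFindCongr (P : List Int) (p q : Int → Bool) (h : ∀ x ∈ P, p x = q x) :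
    P.find? p = P.find? q := by
  induction P with
  | nil => rfl
  | cons a P ih =>
    rw [List.find?_cons, List.find?_cons, h a (by simp)]
    cases q a
    · exact ih (fun x hx => h x (by simp [hx]))
    · rfl

theorem pvFindFilterNe (P : List Int) (j0 : Int) (p q : Int → Bool)
    (hq : p j0 = false) (h : ∀ x, x ≠ j0 → p x = q x) :
    P.find? p = (P.filter (fun i => i != j0)).find? q := by
  induction P with
  | nil => rfl
  | cons a P ih =>
    by_cases ha : a = j0
    · subst ha
      simp only [List.find?_cons, hq, Bool.false_eq_true, if_false, List.filter_cons,
        bne_self_eq_false]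
      exact ih
    · have hfil : (a :: P).filter (fun i => i != j0) = a :: P.filter (fun i => i != j0) := by
        simp [ha]
      rw [hfil, List.find?_cons, List.find?_cons, h a ha]
      cases q a
      · simpa using ih
      · rfl
theorem pvBeqShift (o : Option Int) (p : Int) :
    (o.map (· + 1) == some (p + 1)) = (o == some p) := by
  cases o with
  | none => rfl
  | some q =>
    simp only [Option.map_some]
    by_cases h : q = p
    · subst h; simp
    · have h1 : ((some (q + 1) : Option Int) == some (p + 1)) = false := by
        rw [beq_eq_false_iff_ne]; simp; omega
      have h2 : ((some q : Option Int) == some p) = false := by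
        rw [beq_eq_false_iff_ne]; simp [h]
      rw [h1, h2]

theorem pvEmitEqG (cs : List String) (P : List Int) :
    (PySem.List.pyRange 0 (cs.length) 1).filterMap
        (fun p => (P.find? (fun j => pvFirst j cs == some p)).map pvT)
      = pvG P cs := by
  induction cs generalizing P with
  | nil => rw [pvG]; simp [PySem.List.pyRange_one_eq_nil]
  | cons c cs ih =>
    rw [pvG]
    have hlen : ((c :: cs).length : Int) = (cs.length : Int) + 1 := by push_cast [List.length_cons]; ring
    rw [hlen, PySem.List.pyRange_one_cons (by positivity), show (0:Int) + 1 = 1 from by norm_num]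
    have hshift : PySem.List.pyRange 1 ((cs.length : Int) + 1) 1
        = (PySem.List.pyRange 0 (cs.length) 1).map (· + 1) := by
      rw [PySem.List.pyRange_one, PySem.List.pyRange_one, List.map_map]
      have h1 : ((cs.length : Int) + 1 - 1).toNat = cs.length := by omega
      have h2 : ((cs.length : Int) - 0).toNat = cs.length := by omega
      rw [h1, h2]
      apply List.map_congr_left
      intro k _
      simp; omega
    rw [hshift, List.filterMap_cons, List.filterMap_map]
    have hpred0 : ∀ j, (pvFirst j (c :: cs) == some 0) = pvM j c := by
      intro j
      rw [pvFirst_cons]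
      by_cases h : pvM j c = true
      · simp [h]
      · simp only [Bool.not_eq_true] at h
        rw [h, if_neg (by simp)]
        cases hq : pvFirst j cs with
        | none => rfl
        | some q =>
          have := pvFirst_nonneg j cs q hq
          simp only [Option.map_some]
          rw [beq_eq_false_iff_ne]
          simp only [ne_eq, Option.some.injEq]
          omega
    rw [pvFindCongr P _ _ (fun x _ => hpred0 x)]
    cases hfind : P.find? (fun j => pvM j c) with
    | some j0 =>
      have hj0 : pvM j0 c = true := by have h := List.find?_some hfind; simpa using h
      have hfirst0 : pvFirst j0 (c :: cs) = some 0 := by rw [pvFirst_cons, if_pos hj0]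
      simp only [Option.map_some]
      congr 1
      have hcong : ∀ p ∈ PySem.List.pyRange 0 (cs.length) 1,
          ((fun p => (P.find? (fun j => pvFirst j (c :: cs) == some p)).map pvT) ∘ (· + 1)) p
            = ((P.filter (fun i => i != j0)).find? (fun j => pvFirst j cs == some p)).map pvT := by
        intro p hp
        have hp0 : 0 ≤ p := (PySem.List.mem_pyRange_one.mp hp).1
        simp only [Function.comp_apply]
        congr 1
        apply pvFindFilterNe
        · rw [hfirst0, beq_eq_false_iff_ne]
          simp only [ne_eq, Option.some.injEq]
          omega
        · intro x hx
          have hxm : pvM x c = false := by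
            by_contra hc
            simp only [Bool.not_eq_false] at hc
            exact hx (pvM_excl c x j0 hc hj0)
          rw [pvFirst_cons, hxm, if_neg (by simp)]
          exact pvBeqShift _ p
      rw [List.filterMap_congr hcong]
      exact ih (P.filter (fun i => i != j0))
    | none =>
      have hall : ∀ j ∈ P, pvM j c = false := by
        intro j hj
        have := List.find?_eq_none.mp hfind j hj
        simpa using this
      simp only [Option.map_none]
      have hcong : ∀ p ∈ PySem.List.pyRange 0 (cs.length) 1,
          ((fun p => (P.find? (fun j => pvFirst j (c :: cs) == some p)).map pvT) ∘ (· + 1)) p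
            = (P.find? (fun j => pvFirst j cs == some p)).map pvT := by
        intro p hp
        simp only [Function.comp_apply]
        congr 1
        apply pvFindCongr
        intro x hx
        rw [pvFirst_cons, hall x hx, if_neg (by simp)]
        exact pvBeqShift _ p
      rw [List.filterMap_congr hcong]
      exact ih P
theorem pvT_inj (j j' : Int) (hj : j = 0 ∨ j = 1 ∨ j = 2 ∨ j = 3 ∨ j = 4)
    (hj' : j' = 0 ∨ j' = 1 ∨ j' = 2 ∨ j' = 3 ∨ j' = 4) (h : pvT j = pvT j') : j = j' := by
  rcases hj with rfl | rfl | rfl | rfl | rfl <;> rcases hj' with rfl | rfl | rfl | rfl | rfl <;>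
    revert h <;> decide

theorem pvDedupEqG (cs : List String) (u : List String) (P : List Int)
    (hinv : ∀ j : Int, j ∈ P ↔ (j = 0 ∨ j = 1 ∨ j = 2 ∨ j = 3 ∨ j = 4) ∧ pvT j ∉ u) :
    (cs.filterMap pvClassify).foldl (fun ut t =>
        if ut.contains t then ut else ut ++ [t]) u = u ++ pvG P cs := by
  induction cs generalizing u P with
  | nil => rw [pvG]; simp
  | cons c cs ih =>
    rw [pvG, List.filterMap_cons]
    cases hcl : pvClassify c with
    | none =>
      have hnone : (([0, 1, 2, 3, 4] : List Int).find? (fun j => pvM j c)) = none := by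
        rw [pvClassify_eq_find] at hcl
        cases hf : ([0, 1, 2, 3, 4] : List Int).find? (fun j => pvM j c) with
        | none => rfl
        | some j1 => rw [hf] at hcl; simp at hcl
      have hallm : ∀ j : Int, pvM j c = false := by
        intro j
        by_cases hjr : j = 0 ∨ j = 1 ∨ j = 2 ∨ j = 3 ∨ j = 4
        · have := List.find?_eq_none.mp hnone j (by rcases hjr with rfl|rfl|rfl|rfl|rfl <;> simp)
          simpa using this
        · by_contra hc
          simp only [Bool.not_eq_false] at hc
          unfold pvM at hc
          simp only [Bool.and_eq_true, decide_eq_true_eq] at hc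
          obtain ⟨⟨hj0, hjq⟩, -⟩ := hc
          have hlt : j.toNat < 5 := by
            by_contra hge
            have hdef : pvTopicTable.getD j.toNat ("", []) = ("", []) := by
              apply List.getD_eq_default
              simp [pvTopicTable]; omega
            rw [hdef] at hjq
            simp [pvTm] at hjq
          omega
      have hfP : P.find? (fun j => pvM j c) = none := by
        rw [List.find?_eq_none]
        intro j _
        simp [hallm j]
      rw [hfP]
      exact ih u P hinv
    | some t =>
      rw [pvClassify_eq_find] at hcl
      cases hf : ([0, 1, 2, 3, 4] : List Int).find? (fun j => pvM j c) with
      | none => rw [hf] at hcl; simp at hcl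
      | some j1 =>
        rw [hf] at hcl
        simp only [Option.map_some, Option.some.injEq] at hcl
        subst hcl
        have hj1m : pvM j1 c = true := by have h := List.find?_some hf; simpa using h
        have hj1r : j1 = 0 ∨ j1 = 1 ∨ j1 = 2 ∨ j1 = 3 ∨ j1 = 4 := by
          have h := List.mem_of_find?_eq_some hf
          simpa using h
        simp only [List.foldl_cons]
        by_cases hmem : pvT j1 ∈ u
        · have hcont : u.contains (pvT j1) = true := List.elem_eq_true_of_mem hmem
          rw [if_pos hcont]
          have hfP : P.find? (fun j => pvM j c) = none := by
            rw [List.find?_eq_none]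
            intro j hjP hc
            have hc' : pvM j c = true := by simpa using hc
            have := pvM_excl c j j1 hc' hj1m
            subst this
            exact ((hinv j).mp hjP).2 hmem
          rw [hfP]
          exact ih u P hinv
        · have hcont : u.contains (pvT j1) = false := by
            cases hc : u.contains (pvT j1) with
            | false => rfl
            | true => exact absurd (List.mem_of_elem_eq_true hc) hmem
          rw [if_neg (by simp only [hcont]; exact Bool.false_ne_true)]
          have hj1P : j1 ∈ P := (hinv j1).mpr ⟨hj1r, hmem⟩
          have hfP : P.find? (fun j => pvM j c) = some j1 := by
            apply pvFindUnique P _ j1 hj1P hj1m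
            intro x hx
            exact pvM_excl c x j1 hx hj1m
          rw [hfP]
          rw [ih (u ++ [pvT j1]) (P.filter (fun i => i != j1))]
          · simp
          · intro j
            constructor
            · intro hjf
              have hjP : j ∈ P := List.mem_of_mem_filter hjf
              have hne : j ≠ j1 := by
                have := List.of_mem_filter hjf
                simpa using this
              obtain ⟨hr, hnu⟩ := (hinv j).mp hjP
              refine ⟨hr, ?_⟩
              simp only [List.mem_append, List.mem_singleton]
              rintro (hu | he)
              · exact hnu hu
              · exact hne (pvT_inj j j1 hr hj1r he)
            · rintro ⟨hr, hnu⟩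
              have hnu' : pvT j ∉ u := by
                intro hu
                exact hnu (by simp [hu])
              have hne : j ≠ j1 := by
                intro he
                subst he
                exact hnu (by simp)
              refine List.mem_filter.mpr ⟨(hinv j).mpr ⟨hr, hnu'⟩, by simpa using hne⟩
set_option maxRecDepth 40000 in
theorem pvAltEq (ch : List (List (String × String))) :
    extract_recent_topics_py_alt ch
      = (PySem.List.pyRange 0 (((PySem.List.slice ch (some (-10)) none).map
            (fun m => PySem.Str.lower ((m.lookup "content").getD ""))).length) 1).filterMap
          (fun p => (([0, 1, 2, 3, 4] : List Int).foldl (fun d j =>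
              match (PySem.List.enumerate ((PySem.List.slice ch (some (-10)) none).map
                  (fun m => PySem.Str.lower ((m.lookup "content").getD "")))).find?
                  (fun pc => pvM j pc.2) with
              | some pc => PySem.Dict.insert d pc.1 (pvT j)
              | none => d) PySem.Dict.empty).get? p) := by
  unfold extract_recent_topics_py_alt
  simp only []
  congr 1
theorem pvTopicsFold (ms : List (List (String × String))) (ts : List String) :
    ms.foldl (fun topics message =>
      if PySem.Str.isIn "git" (PySem.Str.lower ((message.lookup "content").getD "")) then topics ++ ["Git operations"]
      else if ["refactor", "rename", "extract"].any (fun w => PySem.Str.isIn w (PySem.Str.lower ((message.lookup "content").getD ""))) then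
        topics ++ ["Code refactoring"]
      else if ["debug", "error", "bug", "fix"].any (fun w => PySem.Str.isIn w (PySem.Str.lower ((message.lookup "content").getD ""))) then
        topics ++ ["Debugging"]
      else if ["search", "find", "look"].any (fun w => PySem.Str.isIn w (PySem.Str.lower ((message.lookup "content").getD ""))) then
        topics ++ ["Code search"]
      else if ["file", "read", "write", "create"].any (fun w => PySem.Str.isIn w (PySem.Str.lower ((message.lookup "content").getD ""))) then
        topics ++ ["File operations"]
      else topics) ts
    = ts ++ ms.filterMap (fun m => pvClassify (PySem.Str.lower ((m.lookup "content").getD ""))) := by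
  induction ms generalizing ts with
  | nil => simp
  | cons m ms ih =>
    simp only [List.foldl_cons, List.filterMap_cons, ih, pvClassify]
    split_ifs <;> simp

theorem extract_recent_topics_py_spec : Claim_equal_extract_recent_topics_py := by
  intro ch _
  unfold Spec_extract_recent_topics_py
  rw [pvAltEq]
  unfold extract_recent_topics_py
  simp only []
  have hrec : (if ch.isEmpty then ([] : List (List (String × String)))
      else PySem.List.slice ch (some (-10)) none) = PySem.List.slice ch (some (-10)) none := by
    by_cases h : ch.isEmpty
    · rw [if_pos h, List.isEmpty_iff.mp h]
      simp [PySem.List.slice]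
    · rw [if_neg h]
  rw [hrec]
  set ms := PySem.List.slice ch (some (-10)) none with hms
  set cs := ms.map (fun m => PySem.Str.lower ((m.lookup "content").getD "")) with hcs
  rw [pvTopicsFold ms []]
  simp only [List.nil_append]
  have hA : ms.filterMap (fun m => pvClassify (PySem.Str.lower ((m.lookup "content").getD "")))
      = cs.filterMap pvClassify := by
    rw [hcs, List.filterMap_map]
    rfl
  rw [hA]
  rw [pvDedupEqG cs [] ([0, 1, 2, 3, 4] : List Int) (by intro j; simp)]
  rw [List.nil_append]
  rw [← pvEmitEqG cs ([0, 1, 2, 3, 4] : List Int)]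
  apply List.filterMap_congr
  intro p _
  rw [pvGetBuild]
  cases ([0, 1, 2, 3, 4] : List Int).find? (fun j => pvFirst j cs == some p) with
  | none => rfl
  | some j => rfl
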